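-- pv_equiv track=rewrite | github.com/asbldream-lab/RNVP | app.py | match_lang
-- ===== SOURCE A (Python) =====
-- def match_lang(pref: str, pool: list):
--     """
--     Matche 'fr' avec 'fr', 'fr-FR', 'fr-CA'.
--     Matche 'en' avec 'en', 'en-US', 'en-GB', 'en-orig'.
--     Retourne le code exact présent dans le pool, ou None.
--     """
--     pref_lower = pref.lower()
--     # 1. Match exact
--     for lang in pool:
--         if lang.lower() == pref_lower:
--             return lang
--     # 2. Match par préfixe avec tiret/underscore (fr-FR, en-US...)
--     for lang in pool:
--         lang_low = lang.lower()
--         if lang_low.startswith(pref_lower + "-") or lang_low.startswith(pref_lower + "_"):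
--             return lang
--     # 3. Match loose (base du code de langue)
--     for lang in pool:
--         base = lang.lower().split("-")[0].split("_")[0]
--         if base == pref_lower:
--             return lang
--     return None
-- ===== SOURCE B (Python) =====
-- def match_lang(pref: str, pool: list):
--     """Single pass over pool with candidate slots instead of A's three passes."""
--     pref_lower = pref.lower()
--     first_prefix = None
--     first_base = None
--     for lang in pool:
--         lang_low = lang.lower()
--         if lang_low == pref_lower:
--             return lang
--         elif first_prefix is None and (lang_low.startswith(pref_lower + "-") or lang_low.startswith(pref_lower + "_")):
--             first_prefix = lang
--         elif first_base is None and lang_low.split("-")[0].split("_")[0] == pref_lower: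
--             first_base = lang
--     return first_prefix if first_prefix is not None else first_base
-- ===== Notes on version B (the rewrite author's own statement) =====
-- stated objective: alternative
-- what changed: Replaced A's three sequential passes over the pool (exact, then dash/underscore prefix, then base-code) by a single pass that returns immediately on an exact match and otherwise records the first prefix and first base candidates in two slots, picked in priority order after the loop.
import Mathlib
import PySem

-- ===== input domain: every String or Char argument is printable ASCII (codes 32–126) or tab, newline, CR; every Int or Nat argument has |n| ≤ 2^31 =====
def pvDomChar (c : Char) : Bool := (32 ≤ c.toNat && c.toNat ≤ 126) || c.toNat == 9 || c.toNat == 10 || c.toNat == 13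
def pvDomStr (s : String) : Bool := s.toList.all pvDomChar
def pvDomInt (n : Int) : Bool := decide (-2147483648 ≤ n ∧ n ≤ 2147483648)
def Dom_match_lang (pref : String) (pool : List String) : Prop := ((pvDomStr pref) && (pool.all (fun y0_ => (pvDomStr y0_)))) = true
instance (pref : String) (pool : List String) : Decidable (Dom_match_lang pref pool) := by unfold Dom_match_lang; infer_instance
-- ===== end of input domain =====

-- B replaces A's three sequential passes over the pool by a single pass with candidate slots (objective: alternative decomposition, same cost).

-- s.split("-")[0].split("_")[0] — identical expression in both Pythons; str.split with a
-- nonempty separator never raises and never returns an empty list, so `[0]` is exactly `.headD []`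
def pvBase (s : String) : String :=
  String.ofList ((PySem.Chars.splitOn ((PySem.Chars.splitOn s.toList ['-']).headD []) ['_']).headD [])

-- ===== PORT A =====
-- pass 1: exact match, early return modeled as Option
def pvPass1 (pl : String) : List String → Option String
  | [] => none
  | lang :: rest => if PySem.Str.lower lang == pl then some lang else pvPass1 pl rest

-- pass 2: dash/underscore prefix match
def pvPass2 (pl : String) : List String → Option String
  | [] => none
  | lang :: rest =>
    let lang_low := PySem.Str.lower lang
    if PySem.Str.startswith lang_low (pl ++ "-") || PySem.Str.startswith lang_low (pl ++ "_") then
      some lang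
    else pvPass2 pl rest

-- pass 3: base of the language code
def pvPass3 (pl : String) : List String → Option String
  | [] => none
  | lang :: rest =>
    if pvBase (PySem.Str.lower lang) == pl then some lang else pvPass3 pl rest

def match_lang (pref : String) (pool : List String) : Option String :=
  let pref_lower := PySem.Str.lower pref
  match pvPass1 pref_lower pool with
  | some lang => some lang
  | none =>
    match pvPass2 pref_lower pool with
    | some lang => some lang
    | none => pvPass3 pref_lower pool

-- ===== PORT B =====
-- one pass: return on exact match; otherwise fill the first_prefix / first_base slots
def pvLoop (pl : String) (first_prefix first_base : Option String) : List String → Option String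
  | [] => match first_prefix with | some x => some x | none => first_base
  | lang :: rest =>
    let lang_low := PySem.Str.lower lang
    if lang_low == pl then some lang
    else if first_prefix == none &&
         (PySem.Str.startswith lang_low (pl ++ "-") || PySem.Str.startswith lang_low (pl ++ "_")) then
      pvLoop pl (some lang) first_base rest
    else if first_base == none && (pvBase lang_low == pl) then
      pvLoop pl first_prefix (some lang) rest
    else pvLoop pl first_prefix first_base rest

def match_lang_alt (pref : String) (pool : List String) : Option String :=
  pvLoop (PySem.Str.lower pref) none none pool

-- ===== PRECONDITION & SPEC =====
def Spec_match_lang (pref : String) (pool : List String) (out : Option String) : Prop := out = match_lang_alt pref pool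
instance (pref : String) (pool : List String) (out : Option String) : Decidable (Spec_match_lang pref pool out) := by unfold Spec_match_lang; infer_instance

-- ===== CLAIM (what is proved, stated in full; the proofs are below) =====
def Claim_equal_match_lang : Prop := ∀ (pref : String) (pool : List String), Dom_match_lang pref pool → Spec_match_lang pref pool (match_lang pref pool)

-- ===== LEMMAS AND PROOFS =====

-- B's loop, started in any slot state, computes A's pass cascade with the slots pre-seeded.
theorem pvLoop_eq (pl : String) (pool : List String) :
    ∀ (fp fb : Option String),
      pvLoop pl fp fb pool =
        match pvPass1 pl pool with
        | some l => some l
        | none =>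
          match fp with
          | some x => some x
          | none =>
            match pvPass2 pl pool with
            | some l => some l
            | none =>
              match fb with
              | some y => some y
              | none => pvPass3 pl pool := by
  induction pool with
  | nil => intro fp fb; cases fp <;> cases fb <;> rfl
  | cons lang rest ih =>
    intro fp fb
    simp only [pvLoop, pvPass1, pvPass2, pvPass3]
    cases h1 : (PySem.Str.lower lang == pl)
    · simp only [Bool.false_eq_true, if_false]
      cases h2 : (PySem.Str.startswith (PySem.Str.lower lang) (pl ++ "-") ||
                  PySem.Str.startswith (PySem.Str.lower lang) (pl ++ "_"))
      · cases h3 : (pvBase (PySem.Str.lower lang) == pl)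
        · cases fp <;> cases fb <;>
            simp only [Bool.and_false, Option.beq_none, Bool.false_eq_true, if_false, ih]
        · cases fp <;> cases fb <;>
            simp only [Bool.and_false, Bool.and_true, Option.beq_none,
              Bool.false_eq_true, if_false, if_true, ih]
          all_goals cases pvPass1 pl rest <;> rfl
      · cases fp
        · simp only [Option.beq_none, if_true, ih]
          cases pvPass1 pl rest <;> rfl
        · cases h3 : (pvBase (PySem.Str.lower lang) == pl) <;> cases fb <;>
            simp only [Bool.and_false, Bool.and_true, Option.beq_none,
              Bool.false_eq_true, if_false, ih] <;>
            cases pvPass1 pl rest <;> rfl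
    · simp only [if_true]

-- ===== VERDICT (by name: the statement is the Claim_ definition above) =====
theorem match_lang_spec : Claim_equal_match_lang := by
  intro pref pool _
  unfold Spec_match_lang match_lang match_lang_alt
  rw [pvLoop_eq]
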